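-- pv_equiv track=rewrite | github.com/hitachi-vantara/vspone-block-ansible | plugins/module_utils/common/ansible_common.py | mask_token
-- ===== SOURCE A (Python) =====
-- def mask_token(token: str, n: int = 12) -> str:
--     """
--     Mask a token string (UUID-like), showing only the last n hex digits (excluding dashes).
--     Dashes remain in their original positions.
--
--     Args:
--         token (str): The token string (with dashes).
--         n (int, optional): Number of hex digits to leave unmasked at the end. Default is 12.
--
--     Returns:
--         str: The masked token string.
--     """
--     if token is None:
--         return None
--
--     # Extract only hex characters (ignore dashes)
--     hex_chars = [c for c in token if c != "-"]
--
--     # Ensure n is not larger than total hex digits (32 for UUID-style tokens)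
--     n = min(n, len(hex_chars))
--
--     # Mask all but last n hex digits
--     masked_hex = ["X"] * (len(hex_chars) - n) + hex_chars[-n:]
--
--     # Reinsert dashes in original positions
--     result = []
--     hex_index = 0
--     for c in token:
--         if c == "-":
--             result.append("-")
--         else:
--             result.append(masked_hex[hex_index])
--             hex_index += 1
--
--     return "".join(result)
-- ===== SOURCE B (Python) =====
-- def mask_token(token: str, n: int = 12) -> str:
--     """Mask a token: single right-to-left pass keeping the last n hex digits."""
--     if token is None:
--         return None
--     out = []
--     kept = 0
--     for c in reversed(token):
--         if c == "-":
--             out.append("-")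
--         elif kept < n:
--             out.append(c)
--             kept += 1
--         else:
--             out.append("X")
--     return "".join(reversed(out))
-- ===== Notes on version B (the rewrite author's own statement) =====
-- stated objective: simpler
-- what changed: Replaces the three-phase shape (extract hex chars, build a precomputed masked array with min()-clamp and a negative slice, then re-walk the token reinserting by index) with one right-to-left pass that keeps a running count of hex digits kept so far.
import Mathlib
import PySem

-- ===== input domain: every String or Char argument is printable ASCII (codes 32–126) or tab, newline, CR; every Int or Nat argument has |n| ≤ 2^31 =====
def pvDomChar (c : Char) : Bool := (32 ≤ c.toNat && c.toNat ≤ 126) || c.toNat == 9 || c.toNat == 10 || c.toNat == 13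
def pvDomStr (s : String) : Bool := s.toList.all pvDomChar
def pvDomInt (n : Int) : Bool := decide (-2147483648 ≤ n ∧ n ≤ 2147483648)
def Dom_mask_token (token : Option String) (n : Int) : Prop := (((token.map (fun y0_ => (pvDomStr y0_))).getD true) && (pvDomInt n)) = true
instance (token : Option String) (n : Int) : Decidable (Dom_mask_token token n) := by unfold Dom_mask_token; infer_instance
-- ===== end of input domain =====

-- B replaces A's extract/clamp/slice/reinsert pipeline with a single right-to-left pass
-- keeping a running count of hex digits kept so far (objective: simpler).


-- ===== PORT A =====
def mask_token (token : Option String) (n : Int) : Option String :=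
  match token with
  | none => none
  | some t =>
    -- hex_chars = [c for c in token if c != "-"]
    let hex_chars : List Char := t.toList.filter (fun c => c != '-')
    -- n = min(n, len(hex_chars))
    let n : Int := min n (PySem.List.len hex_chars)
    -- masked_hex = ["X"] * (len(hex_chars) - n) + hex_chars[-n:]
    let masked_hex : List Char :=
      PySem.List.pyRepeat ['X'] (PySem.List.len hex_chars - n) ++
        PySem.List.slice hex_chars (some (-n)) none
    -- loop appending '-' or masked_hex[hex_index] (index provably in range, so pyGetD is exact here)
    let st := t.toList.foldl
      (fun (st : List Char × Int) c =>
        if c = '-' then (st.1 ++ ['-'], st.2)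
        else (st.1 ++ [PySem.List.pyGetD masked_hex st.2 'X'], st.2 + 1))
      ([], 0)
    some (String.ofList st.1)

-- ===== PORT B =====
def mask_token_alt (token : Option String) (n : Int) : Option String :=
  match token with
  | none => none
  | some t =>
    let st := t.toList.reverse.foldl
      (fun (st : List Char × Int) c =>
        if c = '-' then (st.1 ++ ['-'], st.2)
        else if st.2 < n then (st.1 ++ [c], st.2 + 1)
        else (st.1 ++ ['X'], st.2))
      ([], 0)
    some (String.ofList st.1.reverse)

-- ===== PRECONDITION & SPEC =====
def Spec_mask_token (token : Option String) (n : Int) (out : Option String) : Prop := out = mask_token_alt token n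
instance (token : Option String) (n : Int) (out : Option String) : Decidable (Spec_mask_token token n out) := by unfold Spec_mask_token; infer_instance

-- ===== CLAIM (what is proved, stated in full; the proofs are below) =====
def Claim_equal_mask_token : Prop := ∀ (token : Option String) (n : Int), Dom_mask_token token n → Spec_mask_token token n (mask_token token n)

-- ===== LEMMAS AND PROOFS =====

-- number of hex (non-dash) characters
def hc (cs : List Char) : Nat := (cs.filter (fun c => c != '-')).length

-- common pointwise description: char kept iff its hex-before index k satisfies t - n ≤ k
def specGo (n : Int) : List Char → Int → Int → List Char
  | [], _, _ => []
  | c :: rest, t, k =>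
    if c = '-' then '-' :: specGo n rest t k
    else (if t - n ≤ k then c else 'X') :: specGo n rest t (k + 1)

theorem specGo_congr (n : Int) (cs : List Char) : ∀ (t k t' k' : Int),
    t - k = t' - k' → specGo n cs t k = specGo n cs t' k' := by
  induction cs with
  | nil => intro t k t' k' _; rfl
  | cons c rest ih =>
    intro t k t' k' h
    by_cases hcd : c = '-'
    · simp only [specGo, if_pos hcd]
      rw [ih t k t' k' h]
    · simp only [specGo, if_neg hcd]
      have hcond : (t - n ≤ k) ↔ (t' - n ≤ k') := by omega
      simp only [hcond]
      rw [ih (t) (k + 1) (t') (k' + 1) (by omega)]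

theorem hc_cons_dash (r : List Char) : hc ('-' :: r) = hc r := by simp [hc]

theorem hc_cons_hex (c : Char) (r : List Char) (h : ¬ c = '-') : hc (c :: r) = hc r + 1 := by
  simp [hc, h]

theorem hc_reverse (cs : List Char) : hc cs.reverse = hc cs := by
  simp [hc]

-- ---- A side ----

-- the precomputed array, pointwise
theorem maskedHex_get (H : List Char) (n : Int) (k : Nat) (hk : k < H.length) :
    PySem.List.pyGetD
      (PySem.List.pyRepeat ['X'] (PySem.List.len H - min n (PySem.List.len H)) ++
        PySem.List.slice H (some (-(min n (PySem.List.len H)))) none)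
      (k : Int) 'X'
      = if (H.length : Int) - n ≤ (k : Int) then H[k] else 'X' := by
  rw [PySem.List.pyRepeat_singleton, PySem.List.pyGetD_natCast, PySem.List.slice_some_none,
    PySem.List.len_eq]
  by_cases hpos : 0 < min n (H.length : Int)
  · obtain ⟨r, hr⟩ : ∃ r : Nat, (r : Int) = (H.length : Int) - min n (H.length : Int) :=
      ⟨((H.length : Int) - min n (H.length : Int)).toNat, by omega⟩
    have htn : ((H.length : Int) - min n (H.length : Int)).toNat = r := by omega
    have hclamp : PySem.List.clampIdx H.length (-(min n (H.length : Int))) = r := by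
      simp only [PySem.List.clampIdx]
      split
      · split <;> omega
      · omega
    rw [hclamp, htn]
    by_cases hkr : k < r
    · rw [List.getD_append (List.replicate r 'X') (H.drop r) 'X' k (by simpa using hkr),
        if_neg (by omega), List.getD_eq_getElem?_getD, List.getElem?_replicate]
      split <;> rfl
    · have hkr' : r ≤ k := by omega
      rw [List.getD_append_right (List.replicate r 'X') (H.drop r) 'X' k
        (by simpa using hkr'), if_pos (by omega)]
      have hklt : k - (List.replicate r 'X').length < (H.drop r).length := by
        simp [List.length_replicate, List.length_drop]; omega
      rw [List.getD_eq_getElem (H.drop r) 'X' hklt, List.getElem_drop]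
      simp only [List.length_replicate]
      congr 1
      omega
  · have hrep : k < (List.replicate (((H.length : Int) - min n (H.length : Int)).toNat) 'X').length := by
      simp only [List.length_replicate]; omega
    rw [List.getD_append _ _ 'X' k hrep, if_neg (by omega),
      List.getD_eq_getElem?_getD, List.getElem?_replicate]
    split <;> rfl

-- A's reinsertion loop produces specGo
theorem foldA_spec (H : List Char) (n : Int) :
    ∀ (rest : List Char) (o : List Char) (k : Nat),
      H.drop k = rest.filter (fun c => c != '-') →
      (rest.foldl
        (fun (st : List Char × Int) c =>
          if c = '-' then (st.1 ++ ['-'], st.2)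
          else (st.1 ++ [PySem.List.pyGetD
            (PySem.List.pyRepeat ['X'] (PySem.List.len H - min n (PySem.List.len H)) ++
              PySem.List.slice H (some (-(min n (PySem.List.len H)))) none) st.2 'X'], st.2 + 1))
        (o, (k : Int))).1
      = o ++ specGo n rest (H.length : Int) (k : Int) := by
  intro rest
  induction rest with
  | nil => intro o k _; simp [specGo]
  | cons c r ih =>
    intro o k hdrop
    by_cases hcd : c = '-'
    · subst hcd
      simp only [List.foldl_cons, reduceIte]
      rw [ih (o ++ ['-']) k (by simpa using hdrop)]
      simp [specGo]
    · have hfil : H.drop k = c :: r.filter (fun c => c != '-') := by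
        simpa [hcd] using hdrop
      have hklt : k < H.length := by
        by_contra h
        push_neg at h
        rw [List.drop_eq_nil_of_le h] at hfil
        simp at hfil
      have hHk : H[k] = c := by
        have hsome : H.drop k = c :: (H.drop k).tail := by rw [hfil]; rfl
        have h0 : (H.drop k)[0]? = H[k + 0]? := List.getElem?_drop ..
        rw [hfil] at h0
        simp only [List.getElem?_cons_zero, Nat.add_zero] at h0
        rw [List.getElem?_eq_getElem hklt] at h0
        exact (Option.some.injEq _ _ ▸ h0.symm : H[k] = c)
      simp only [List.foldl_cons, if_neg hcd]
      have hstep : ((k : Int) + 1) = ((k + 1 : Nat) : Int) := by push_cast; ring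
      rw [hstep, ih _ (k + 1)
        (by
          rw [← List.tail_drop, hfil]
          rfl)]

      rw [maskedHex_get H n k hklt, hHk]
      have hcg : specGo n r (H.length : Int) ((k + 1 : Nat) : Int)
          = specGo n r (H.length : Int) ((k : Int) + 1) :=
        specGo_congr n r _ _ _ _ (by push_cast; ring)
      rw [hcg]
      simp [specGo, hcd]

-- ---- B side ----

def mapB (n : Int) : List Char → Int → List Char
  | [], _ => []
  | c :: rs, k =>
    if c = '-' then '-' :: mapB n rs k
    else (if k < n then c else 'X') :: mapB n rs (k + 1)

theorem mapB_ge (n : Int) (rs : List Char) : ∀ (k k' : Int), n ≤ k → n ≤ k' →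
    mapB n rs k = mapB n rs k' := by
  induction rs with
  | nil => intro k k' _ _; rfl
  | cons c r ih =>
    intro k k' hk hk'
    by_cases hcd : c = '-'
    · simp only [mapB, if_pos hcd]
      rw [ih k k' hk hk']
    · simp only [mapB, if_neg hcd, if_neg (by omega : ¬ k < n), if_neg (by omega : ¬ k' < n)]
      rw [ih (k + 1) (k' + 1) (by omega) (by omega)]

theorem foldB_spec (n : Int) : ∀ (rs o : List Char) (k : Int),
    (rs.foldl
      (fun (st : List Char × Int) c =>
        if c = '-' then (st.1 ++ ['-'], st.2)
        else if st.2 < n then (st.1 ++ [c], st.2 + 1)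
        else (st.1 ++ ['X'], st.2))
      (o, k)).1
    = o ++ mapB n rs k := by
  intro rs
  induction rs with
  | nil => intro o k; simp [mapB]
  | cons c r ih =>
    intro o k
    by_cases hcd : c = '-'
    · subst hcd
      simp only [List.foldl_cons, reduceIte]
      rw [ih]
      simp [mapB]
    · by_cases hk : k < n
      · simp only [List.foldl_cons, if_neg hcd, if_pos hk]
        rw [ih]
        simp [mapB, hcd, hk]
      · simp only [List.foldl_cons, if_neg hcd, if_neg hk]
        rw [ih]
        simp only [mapB, if_neg hcd, if_neg hk, List.append_assoc, List.singleton_append]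
        rw [mapB_ge n r k (k + 1) (by omega) (by omega)]

theorem mapB_append (n : Int) : ∀ (xs ys : List Char) (k : Int),
    mapB n (xs ++ ys) k = mapB n xs k ++ mapB n ys (k + (hc xs : Int)) := by
  intro xs
  induction xs with
  | nil => intro ys k; simp [mapB, hc]
  | cons c r ih =>
    intro ys k
    by_cases hcd : c = '-'
    · subst hcd
      simp only [List.cons_append, mapB, reduceIte]
      rw [ih, hc_cons_dash]
    · simp only [List.cons_append, mapB, if_neg hcd]
      rw [ih, hc_cons_hex c r hcd]
      have hcast : k + 1 + (hc r : Int) = k + ((hc r + 1 : Nat) : Int) := by push_cast; ring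
      rw [hcast]

theorem mapB_reverse (n : Int) (cs : List Char) : ∀ (k : Int),
    mapB n cs.reverse k = (specGo n cs ((hc cs : Int) + k) 0).reverse := by
  induction cs with
  | nil => intro k; rfl
  | cons c rest ih =>
    intro k
    rw [List.reverse_cons, mapB_append, hc_reverse, ih]
    by_cases hcd : c = '-'
    · subst hcd
      rw [hc_cons_dash]
      simp only [specGo, reduceIte, List.reverse_cons, mapB]
    · rw [hc_cons_hex c rest hcd]
      simp only [specGo, List.reverse_cons, mapB, if_neg hcd]
      have h1 : specGo n rest (((hc rest + 1 : Nat) : Int) + k) (0 + 1)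
          = specGo n rest ((hc rest : Int) + k) 0 :=
        specGo_congr n rest _ _ _ _ (by push_cast; ring)
      rw [h1]
      have h2 : ((((hc rest + 1 : Nat) : Int) + k - n ≤ 0)) ↔ (k + ((hc rest : Nat) : Int) < n) := by
        push_cast; omega
      simp only [h2]

-- ===== VERDICT (by name: the statement is the Claim_ definition above) =====
theorem mask_token_spec : Claim_equal_mask_token := by
  unfold Claim_equal_mask_token
  intro token n _
  unfold Spec_mask_token
  match token with
  | none => rfl
  | some t =>
    simp only [mask_token, mask_token_alt, Option.some.injEq]
    rw [foldB_spec]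
    have hA := foldA_spec (t.toList.filter (fun c => c != '-')) n t.toList [] 0
      (by simp)
    simp only [Nat.cast_zero] at hA
    rw [hA]
    rw [mapB_reverse]
    have hlen : ((hc t.toList : Int) + 0) = ((t.toList.filter (fun c => c != '-')).length : Int) := by
      simp [hc]
    rw [hlen]
    simp
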